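-- pv_equiv track=rewrite | github.com/kol060k/Yandex_Algorithm_Training_2021 | HW6/C.py | smallest_desk
-- ===== SOURCE A (Python) =====
-- def is_fit(w, h, n, size):
--     # Функция проверяет, влезут ли дипломы на доску size x size
--     w_max = size // w
--     h_max = size // h
--     return w_max * h_max >= n
--
-- def smallest_desk(w, h, n):
--     # Будем перебирать размеры доски от 1 до max(n*w, h) (если все дипломы повесить в один ряд)
--     L = 1
--     R = max(n * w, h)
--     while L < R:
--         m = (L + R) // 2
--         if is_fit(w, h, n, m):
--             R = m
--         else:
--             L = m + 1
--     return L
-- ===== SOURCE B (Python) =====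
-- def smallest_desk(w, h, n):
--     # Enumerate grid shapes instead of binary searching the board size:
--     # with c columns and r = ceil(n/c) rows the minimal square side is
--     # max(c*w, r*h); the optimum is attained with min(c, r) <= ~sqrt(n),
--     # so trying both orientations for each k with k*(k-1) <= n suffices.
--     if n <= 0:
--         return 1  # nothing to hang: the smallest board, side 1
--     best = max(n * w, h)  # all diplomas in one row
--     k = 1
--     while k * (k - 1) <= n:
--         q = -(-n // k)  # ceil(n / k)
--         best = min(best, max(k * w, q * h))  # k columns, q rows
--         best = min(best, max(q * w, k * h))  # q columns, k rows
--         k += 1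
--     return best
-- ===== Notes on version B (the rewrite author's own statement) =====
-- stated objective: alternative
-- what changed: Replaces A's binary search over the board size (with its is_fit feasibility predicate) by a direct enumeration of grid shapes: for each k with k*(k-1) <= n it tries k columns and k rows with ceil(n/k) of the other, taking the minimum of max(cols*w, rows*h).
-- outside the precondition, e.g. on smallest_desk(1, -2, 3): A returns 3, B returns 1; on smallest_desk(-3, -4, 7): A returns 1, B returns -9
import Mathlib
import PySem

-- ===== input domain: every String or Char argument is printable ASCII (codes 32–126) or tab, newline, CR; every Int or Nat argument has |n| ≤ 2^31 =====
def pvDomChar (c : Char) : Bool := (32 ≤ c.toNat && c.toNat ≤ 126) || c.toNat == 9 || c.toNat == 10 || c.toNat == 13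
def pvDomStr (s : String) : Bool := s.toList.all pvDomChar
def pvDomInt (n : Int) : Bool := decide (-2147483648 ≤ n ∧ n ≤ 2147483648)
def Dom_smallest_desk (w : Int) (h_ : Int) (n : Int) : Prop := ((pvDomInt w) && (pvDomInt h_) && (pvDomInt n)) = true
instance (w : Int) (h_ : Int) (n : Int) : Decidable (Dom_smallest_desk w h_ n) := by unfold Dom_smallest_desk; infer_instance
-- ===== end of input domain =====

-- B replaces A's binary search over the board size by a direct enumeration of
-- grid shapes (k columns / k rows for k up to ~sqrt n); objective: alternative.

-- ===== PORT A =====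
def is_fit (w : Int) (h : Int) (n : Int) (size : Int) : Bool :=
  let w_max := PySem.Int.floordiv size w
  let h_max := PySem.Int.floordiv size h
  decide (n ≤ w_max * h_max)

-- the 'while L < R' loop of A
def bsearchLoop (w : Int) (h : Int) (n : Int) (L : Int) (R : Int) : Int :=
  if hLR : L < R then
    let m := PySem.Int.floordiv (L + R) 2
    if is_fit w h n m then bsearchLoop w h n L m
    else bsearchLoop w h n (m + 1) R
  else L
termination_by (R - L).toNat
decreasing_by
  · have h1 : PySem.Int.floordiv (L + R) 2 < R :=
      (PySem.Int.floordiv_lt_iff_lt_mul (by omega)).mpr (by omega)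
    have h2 : L ≤ PySem.Int.floordiv (L + R) 2 :=
      (PySem.Int.le_floordiv_iff_mul_le (by omega)).mpr (by omega)
    omega
  · have h1 : PySem.Int.floordiv (L + R) 2 < R :=
      (PySem.Int.floordiv_lt_iff_lt_mul (by omega)).mpr (by omega)
    have h2 : L ≤ PySem.Int.floordiv (L + R) 2 :=
      (PySem.Int.le_floordiv_iff_mul_le (by omega)).mpr (by omega)
    omega

def smallest_desk (w : Int) (h_ : Int) (n : Int) : Int :=
  bsearchLoop w h_ n 1 (max (n * w) h_)

-- ===== PORT B =====
-- the 'while k * (k - 1) <= n' loop of B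
def altLoop (w : Int) (h : Int) (n : Int) (k : Int) (best : Int) : Int :=
  if hk : k * (k - 1) ≤ n then
    let q := -(PySem.Int.floordiv (-n) k)
    let best1 := min best (max (k * w) (q * h))
    let best2 := min best1 (max (q * w) (k * h))
    altLoop w h n (k + 1) best2
  else best
termination_by (n + 2 - k).toNat
decreasing_by
  have h1 : (0:Int) ≤ (k - 1) * (k - 1) := mul_self_nonneg _
  have h2 : k * (k - 1) = (k - 1) * (k - 1) + (k - 1) := by ring
  omega

def smallest_desk_alt (w : Int) (h_ : Int) (n : Int) : Int :=
  if n ≤ 0 then 1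
  else altLoop w h_ n 1 (max (n * w) h_)

-- ===== PRECONDITION & SPEC =====
-- Pre_ restricts to the task's natural domain (positive diploma dimensions),
-- plus the degenerate inputs n ≤ 0 on which A still provably returns 1 (an
-- empty search range, or both dimensions negative so every size fits); on the
-- remaining inputs (a nonpositive w or h_ with diplomas to place) A either
-- divides by zero or returns an accident of its non-monotone binary search,
-- which B does not reproduce.
def Pre_smallest_desk (w : Int) (h_ : Int) (n : Int) : Prop :=
  (1 ≤ w ∧ 1 ≤ h_) ∨ (n ≤ 0 ∧ (max (n * w) h_ ≤ 1 ∨ (w ≤ -1 ∧ h_ ≤ -1)))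
instance (w : Int) (h_ : Int) (n : Int) : Decidable (Pre_smallest_desk w h_ n) := by
  unfold Pre_smallest_desk; infer_instance

def pvWitness_smallest_desk : Int × Int × Int := (1, 1, 1)

def Spec_smallest_desk (w : Int) (h_ : Int) (n : Int) (out : Int) : Prop := out = smallest_desk_alt w h_ n
instance (w : Int) (h_ : Int) (n : Int) (out : Int) : Decidable (Spec_smallest_desk w h_ n out) := by
  unfold Spec_smallest_desk; infer_instance

-- ===== CLAIM (what is proved, stated in full; the proofs are below) =====
def Claim_equal_smallest_desk : Prop := ∀ (w : Int) (h_ : Int) (n : Int), Dom_smallest_desk w h_ n → Pre_smallest_desk w h_ n → Spec_smallest_desk w h_ n (smallest_desk w h_ n)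

-- ===== LEMMAS AND PROOFS =====

-- divisor-positive floor-division facts
theorem fd_le_of_mul_le {a b q : Int} (hb : 0 < b) (h : q * b ≤ a) :
    q ≤ PySem.Int.floordiv a b :=
  (PySem.Int.le_floordiv_iff_mul_le hb).mpr h

theorem fd_mul_le {a b : Int} (hb : 0 < b) : PySem.Int.floordiv a b * b ≤ a :=
  (PySem.Int.le_floordiv_iff_mul_le hb).mp le_rfl

theorem fd_nonneg {a b : Int} (hb : 0 < b) (ha : 0 ≤ a) :
    0 ≤ PySem.Int.floordiv a b :=
  fd_le_of_mul_le hb (by nlinarith)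

theorem fd_mono {a a' b : Int} (hb : 0 < b) (h : a ≤ a') :
    PySem.Int.floordiv a b ≤ PySem.Int.floordiv a' b :=
  fd_le_of_mul_le hb (le_trans (fd_mul_le hb) h)

-- ceiling division q = -((-n) // k), k > 0 : its two bracket facts
theorem ceil_bracket {n k : Int} (hk : 0 < k) :
    (-(PySem.Int.floordiv (-n) k) - 1) * k < n ∧ n ≤ -(PySem.Int.floordiv (-n) k) * k :=
  (PySem.Int.neg_floordiv_neg_eq_iff_of_pos hk).mp rfl

theorem ceil_le {n k b : Int} (hk : 0 < k) (h : n ≤ b * k) :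
    -(PySem.Int.floordiv (-n) k) ≤ b := by
  have h1 := (ceil_bracket (n := n) (k := k) hk).1
  nlinarith

theorem ceil_pos {n k : Int} (hk : 0 < k) (hn : 1 ≤ n) :
    1 ≤ -(PySem.Int.floordiv (-n) k) := by
  have h2 := (ceil_bracket (n := n) (k := k) hk).2
  nlinarith

-- is_fit is monotone in size (w, h ≥ 1, size ≥ 1)
theorem is_fit_mono {w h n m m' : Int} (hw : 1 ≤ w) (hh : 1 ≤ h)
    (hm : 1 ≤ m) (hmm : m ≤ m') (hf : is_fit w h n m = true) :
    is_fit w h n m' = true := by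
  simp only [is_fit, decide_eq_true_eq] at hf ⊢
  have ha := fd_mono (a := m) (a' := m') (by omega : (0:Int) < w) hmm
  have hb := fd_mono (a := m) (a' := m') (by omega : (0:Int) < h) hmm
  have ha0 := fd_nonneg (a := m) (by omega : (0:Int) < w) (by omega)
  have hb0 := fd_nonneg (a := m) (by omega : (0:Int) < h) (by omega)
  nlinarith

-- any max (a*w) (b*h) with a,b ≥ 1 and a*b ≥ n fits
theorem cand_fit {w h n a b : Int} (hw : 1 ≤ w) (hh : 1 ≤ h)
    (ha : 1 ≤ a) (hb : 1 ≤ b) (hab : n ≤ a * b) :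
    is_fit w h n (max (a * w) (b * h)) = true := by
  simp only [is_fit, decide_eq_true_eq]
  have h1 : a ≤ PySem.Int.floordiv (max (a * w) (b * h)) w :=
    fd_le_of_mul_le (by omega) (le_max_left _ _)
  have h2 : b ≤ PySem.Int.floordiv (max (a * w) (b * h)) h :=
    fd_le_of_mul_le (by omega) (le_max_right _ _)
  nlinarith

-- if every size in [L, R) fits, the loop returns L
theorem bsearch_triv (w h n : Int) (L R : Int)
    (hall : ∀ m, L ≤ m → m < R → is_fit w h n m = true) :
    bsearchLoop w h n L R = L := by
  fun_induction bsearchLoop w h n L R with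
  | case1 L R hlt m hfit ih =>
    have hmR : m < R := (PySem.Int.floordiv_lt_iff_lt_mul (by omega)).mpr (by omega)
    have hLm : L ≤ m := (PySem.Int.le_floordiv_iff_mul_le (by omega)).mpr (by omega)
    exact ih fun x hLx hxm => hall x hLx (by omega)
  | case2 L R hlt m hfit ih =>
    have hmR : m < R := (PySem.Int.floordiv_lt_iff_lt_mul (by omega)).mpr (by omega)
    have hLm : L ≤ m := (PySem.Int.le_floordiv_iff_mul_le (by omega)).mpr (by omega)
    rw [hall m hLm hmR] at hfit
    exact absurd rfl hfit
  | case3 L R hnlt => rfl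

-- with both dimensions negative and n ≤ 0, every size ≥ 1 fits
theorem is_fit_neg {w h n m : Int} (hw : w ≤ -1) (hh : h ≤ -1) (hn : n ≤ 0)
    (hm : 1 ≤ m) : is_fit w h n m = true := by
  simp only [is_fit, decide_eq_true_eq]
  have ew : PySem.Int.floordiv m w = PySem.Int.floordiv (-m) (-w) := by
    have := PySem.Int.floordiv_neg_neg (-m) (-w)
    simpa using this.symm
  have eh : PySem.Int.floordiv m h = PySem.Int.floordiv (-m) (-h) := by
    have := PySem.Int.floordiv_neg_neg (-m) (-h)
    simpa using this.symm
  have hw' : PySem.Int.floordiv (-m) (-w) < 0 :=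
    (PySem.Int.floordiv_lt_iff_lt_mul (by omega)).mpr (by omega)
  have hh' : PySem.Int.floordiv (-m) (-h) < 0 :=
    (PySem.Int.floordiv_lt_iff_lt_mul (by omega)).mpr (by omega)
  rw [ew, eh]
  nlinarith

-- the binary-search loop returns the least fitting size in [L, R]
theorem bsearch_spec (w h n : Int) (hw : 1 ≤ w) (hh : 1 ≤ h) (L R : Int)
    (h1L : 1 ≤ L) (hLR : L ≤ R) (hR : is_fit w h n R = true)
    (hbelow : ∀ x, 1 ≤ x → x < L → is_fit w h n x = false) :
    L ≤ bsearchLoop w h n L R ∧ bsearchLoop w h n L R ≤ R ∧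
      is_fit w h n (bsearchLoop w h n L R) = true ∧
      ∀ x, 1 ≤ x → x < bsearchLoop w h n L R → is_fit w h n x = false := by
  fun_induction bsearchLoop w h n L R with
  | case1 L R hlt m hfit ih =>
    have hmR : m < R := (PySem.Int.floordiv_lt_iff_lt_mul (by omega)).mpr (by omega)
    have hLm : L ≤ m := (PySem.Int.le_floordiv_iff_mul_le (by omega)).mpr (by omega)
    have := ih h1L hLm hfit hbelow
    exact ⟨this.1, by omega, this.2.2.1, this.2.2.2⟩
  | case2 L R hlt m hfit ih =>
    have hmR : m < R := (PySem.Int.floordiv_lt_iff_lt_mul (by omega)).mpr (by omega)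
    have hLm : L ≤ m := (PySem.Int.le_floordiv_iff_mul_le (by omega)).mpr (by omega)
    have hbelow' : ∀ x, 1 ≤ x → x < m + 1 → is_fit w h n x = false := by
      intro x hx1 hxm
      by_cases hxL : x < L
      · exact hbelow x hx1 hxL
      · by_contra hcon
        have : is_fit w h n m = true :=
          is_fit_mono hw hh (by omega) (by omega)
            (by revert hcon; cases is_fit w h n x <;> simp)
        simp [this] at hfit
    have := ih (by omega) (by omega) hR hbelow'
    exact ⟨by omega, this.2.1, this.2.2.1, this.2.2.2⟩
  | case3 L R hnlt =>
    have : L = R := by omega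
    exact ⟨le_rfl, by omega, this ▸ hR, hbelow⟩

-- the top candidate (one row of n) fits
theorem top_fit {w h n : Int} (hw : 1 ≤ w) (hh : 1 ≤ h) (hn : 1 ≤ n) :
    is_fit w h n (max (n * w) h) = true := by
  have := cand_fit (n := n) hw hh hn le_rfl (by omega)
  simpa using this

-- altLoop keeps returning a fitting size ≥ 1
theorem altLoop_fit (w h n : Int) (hw : 1 ≤ w) (hh : 1 ≤ h) (hn : 1 ≤ n)
    (k best : Int) (hk : 1 ≤ k) (hbest1 : 1 ≤ best)
    (hbest : is_fit w h n best = true) :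
    1 ≤ altLoop w h n k best ∧ is_fit w h n (altLoop w h n k best) = true := by
  fun_induction altLoop w h n k best with
  | case1 k best hcond q best1 best2 ih =>
    have hq : 1 ≤ q := ceil_pos (by omega) hn
    have hqk : n ≤ q * k := (ceil_bracket (n := n) (k := k) (by omega)).2
    have hc1 : is_fit w h n (max (k * w) (q * h)) = true :=
      cand_fit hw hh hk hq (by nlinarith)
    have hc2 : is_fit w h n (max (q * w) (k * h)) = true :=
      cand_fit hw hh hq hk (by nlinarith)
    have hb1a : 1 ≤ best1 := by
      have : 1 ≤ max (k * w) (q * h) := le_trans (by nlinarith) (le_max_left _ _)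
      simp only [best1, le_min_iff]; exact ⟨hbest1, this⟩
    have hb1f : is_fit w h n best1 = true := by
      rcases min_choice best (max (k * w) (q * h)) with hmin | hmin
      · simpa [best1, hmin] using hbest
      · simpa [best1, hmin] using hc1
    have hb2a : 1 ≤ best2 := by
      have : 1 ≤ max (q * w) (k * h) := le_trans (by nlinarith) (le_max_right _ _)
      simp only [best2, le_min_iff]; exact ⟨hb1a, this⟩
    have hb2f : is_fit w h n best2 = true := by
      rcases min_choice best1 (max (q * w) (k * h)) with hmin | hmin
      · simpa [best2, hmin] using hb1f
      · simpa [best2, hmin] using hc2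
    exact ih (by omega) hb2a hb2f
  | case2 k best hcond => exact ⟨hbest1, hbest⟩

-- altLoop's result is ≤ best and ≤ every enumerated candidate
theorem altLoop_le (w h n : Int) (k best : Int) (hk : 1 ≤ k) :
    altLoop w h n k best ≤ best ∧
      ∀ j, k ≤ j → j * (j - 1) ≤ n →
        altLoop w h n k best ≤ max (j * w) (-(PySem.Int.floordiv (-n) j) * h) ∧
        altLoop w h n k best ≤ max (-(PySem.Int.floordiv (-n) j) * w) (j * h) := by
  fun_induction altLoop w h n k best with
  | case1 k best hcond q best1 best2 ih =>
    obtain ⟨ihbest, ihcand⟩ := ih (by omega)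
    have hle1 : altLoop w h n (k + 1) best2 ≤ best1 :=
      le_trans ihbest (min_le_left _ _)
    have hlebest : altLoop w h n (k + 1) best2 ≤ best :=
      le_trans hle1 (min_le_left _ _)
    refine ⟨hlebest, ?_⟩
    intro j hkj hj
    by_cases hjk : j = k
    · subst hjk
      constructor
      · exact le_trans hle1 (min_le_right _ _)
      · exact le_trans ihbest (min_le_right _ _)
    · exact ihcand j (by omega) hj
  | case2 k best hcond =>
    refine ⟨le_rfl, ?_⟩
    intro j hkj hj
    exfalso
    have : (0:Int) ≤ (j - k) * (j + k - 1) := by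
      apply mul_nonneg <;> omega
    nlinarith

-- B's result is ≤ any fitting size m ≥ 1
theorem alt_le_fit {w h n m : Int} (hw : 1 ≤ w) (hh : 1 ≤ h) (hn : 1 ≤ n)
    (hm : 1 ≤ m) (hfit : is_fit w h n m = true) :
    altLoop w h n 1 (max (n * w) h) ≤ m := by
  simp only [is_fit, decide_eq_true_eq] at hfit
  set a := PySem.Int.floordiv m w with hadef
  set b := PySem.Int.floordiv m h with hbdef
  have haw : a * w ≤ m := fd_mul_le (by omega)
  have hbh : b * h ≤ m := fd_mul_le (by omega)
  have ha0 : 0 ≤ a := fd_nonneg (by omega) (by omega)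
  have hb0 : 0 ≤ b := fd_nonneg (by omega) (by omega)
  have ha1 : 1 ≤ a := by nlinarith
  have hb1 : 1 ≤ b := by nlinarith
  -- shrink (a, b) to a both-ways-minimal pair (c1, r1)
  set r0 := -(PySem.Int.floordiv (-n) a) with hr0def
  have hr0b : r0 ≤ b := ceil_le (by omega) (by nlinarith)
  have hr01 : 1 ≤ r0 := ceil_pos (by omega) hn
  have hr0n : n ≤ r0 * a := (ceil_bracket (by omega)).2
  have hr0s : (r0 - 1) * a < n := (ceil_bracket (by omega)).1
  set c1 := -(PySem.Int.floordiv (-n) r0) with hc1def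
  have hc1a : c1 ≤ a := ceil_le (by omega) (by nlinarith)
  have hc11 : 1 ≤ c1 := ceil_pos (by omega) hn
  have hc1n : n ≤ c1 * r0 := (ceil_bracket (by omega)).2
  have hc1s : (c1 - 1) * r0 < n := (ceil_bracket (by omega)).1
  set r1 := -(PySem.Int.floordiv (-n) c1) with hr1def
  have hr1r0 : r1 ≤ r0 := ceil_le (by omega) (by nlinarith)
  have hr11 : 1 ≤ r1 := ceil_pos (by omega) hn
  have hr1n : n ≤ r1 * c1 := (ceil_bracket (by omega)).2
  have hr1s : (r1 - 1) * c1 < n := (ceil_bracket (by omega)).1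
  have hobj : max (c1 * w) (r1 * h) ≤ m := by
    have h1 : c1 * w ≤ a * w := by nlinarith
    have h2 : r1 * h ≤ b * h := by nlinarith
    simp only [max_le_iff]; omega
  rcases le_total c1 r1 with hcr | hcr
  · -- k = c1 columns: candidate 1 at j = c1 is exactly max (c1*w) (r1*h)
    have hkk : c1 * (c1 - 1) ≤ n := by nlinarith
    have := (altLoop_le w h n 1 (max (n * w) h) le_rfl).2 c1 hc11 hkk
    calc altLoop w h n 1 (max (n * w) h) ≤ max (c1 * w) (r1 * h) := by
          simpa [← hr1def] using this.1
      _ ≤ m := hobj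
  · -- k = r1 rows: candidate 2 at j = r1 is ≤ max (c1*w) (r1*h)
    have hkk : r1 * (r1 - 1) ≤ n := by nlinarith
    have hcand := (altLoop_le w h n 1 (max (n * w) h) le_rfl).2 r1 hr11 hkk
    have hc2c1 : -(PySem.Int.floordiv (-n) r1) ≤ c1 := ceil_le (by omega) (by nlinarith)
    have : max (-(PySem.Int.floordiv (-n) r1) * w) (r1 * h) ≤ max (c1 * w) (r1 * h) := by
      have : -(PySem.Int.floordiv (-n) r1) * w ≤ c1 * w := by nlinarith
      simp only [max_le_iff]
      exact ⟨le_trans this (le_max_left _ _), le_max_right _ _⟩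
    calc altLoop w h n 1 (max (n * w) h) ≤ _ := hcand.2
      _ ≤ max (c1 * w) (r1 * h) := this
      _ ≤ m := hobj

-- ===== VERDICT (by name: the statement is the Claim_ definition above) =====
theorem smallest_desk_spec : Claim_equal_smallest_desk := by
  intro w h_ n _ hpre
  unfold Spec_smallest_desk smallest_desk smallest_desk_alt
  rcases hpre with ⟨hw, hh⟩ | ⟨hn0, hdeg⟩
  swap
  · -- degenerate inputs: A's loop returns its lower bound 1, B returns 1
    rw [if_pos hn0]
    rcases hdeg with hR1 | ⟨hwn, hhn⟩
    · exact bsearch_triv w h_ n 1 (max (n * w) h_) (by intro m h1m hm; omega)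
    · exact bsearch_triv w h_ n 1 (max (n * w) h_)
        (fun m h1m _ => is_fit_neg hwn hhn hn0 h1m)
  by_cases hn : n ≤ 0
  · -- every size ≥ 1 fits; the search returns its lower bound 1
    simp only [if_pos hn]
    have hfit1 : is_fit w h_ n 1 = true := by
      simp only [is_fit, decide_eq_true_eq]
      have ha0 := fd_nonneg (a := (1:Int)) (b := w) (by omega) (by omega)
      have hb0 := fd_nonneg (a := (1:Int)) (b := h_) (by omega) (by omega)
      nlinarith
    have hR1 : (1:Int) ≤ max (n * w) h_ := le_trans hh (le_max_right _ _)
    have hRfit : is_fit w h_ n (max (n * w) h_) = true :=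
      is_fit_mono hw hh (by omega) hR1 hfit1
    have hs := bsearch_spec w h_ n hw hh 1 (max (n * w) h_) le_rfl hR1 hRfit
      (by intro x hx1 hxL; omega)
    rcases Int.lt_or_le 1 (bsearchLoop w h_ n 1 (max (n * w) h_)) with hgt | hle
    · have := hs.2.2.2 1 le_rfl hgt
      simp [hfit1] at this
    · omega
  · simp only [if_neg hn]
    push_neg at hn
    have hn1 : 1 ≤ n := by omega
    have hR1 : (1:Int) ≤ max (n * w) h_ := le_trans hh (le_max_right _ _)
    have hRfit : is_fit w h_ n (max (n * w) h_) = true := top_fit hw hh hn1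
    have hs := bsearch_spec w h_ n hw hh 1 (max (n * w) h_) le_rfl hR1 hRfit
      (by intro x hx1 hxL; omega)
    have hAfit := hs.2.2.1
    have hA1 : 1 ≤ bsearchLoop w h_ n 1 (max (n * w) h_) := hs.1
    have hBA : altLoop w h_ n 1 (max (n * w) h_) ≤ bsearchLoop w h_ n 1 (max (n * w) h_) :=
      alt_le_fit hw hh hn1 hA1 hAfit
    have hB := altLoop_fit w h_ n hw hh hn1 1 (max (n * w) h_) le_rfl hR1 hRfit
    rcases Int.lt_or_le (altLoop w h_ n 1 (max (n * w) h_)) (bsearchLoop w h_ n 1 (max (n * w) h_)) with hlt | hle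
    · have := hs.2.2.2 _ hB.1 hlt
      simp [hB.2] at this
    · omega
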